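-- pv_equiv track=rewrite | github.com/layer3switch/salt | salt/modules/xfs.py | _xfs_info_get_kv
-- ===== SOURCE A (Python) =====
-- def _xfs_info_get_kv(serialized):
--     '''
--     Parse one line of the XFS info output.
--     '''
--     # No need to know sub-elements here
--     if serialized.startswith("="):
--         serialized = serialized[1:].strip()
--
--     serialized = serialized.replace(" = ", "=*** ").replace(" =", "=")
--
--     # Keywords has no spaces, values do
--     opt = []
--     for tkn in serialized.split(" "):
--         if not opt or "=" in tkn:
--             opt.append(tkn)
--         else:
--             opt[len(opt) - 1] = opt[len(opt) - 1] + " " + tkn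
--
--     # Preserve ordering
--     return [tuple(items.split("=")) for items in opt]
-- ===== SOURCE B (Python) =====
-- def _xfs_info_get_kv(serialized):
--     '''
--     Parse one line of the XFS info output.
--     '''
--     if serialized.startswith("="):
--         serialized = serialized[1:].strip()
--
--     serialized = serialized.replace(" = ", "=*** ").replace(" =", "=")
--
--     # Recursive decomposition: each group is the leading token together with
--     # the run of following value tokens (no '='); recurse on the remainder.
--     def groups(tokens):
--         i = 1
--         while i < len(tokens) and "=" not in tokens[i]:
--             i += 1
--         head = " ".join(tokens[:i])
--         return [head] + (groups(tokens[i:]) if i < len(tokens) else [])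
--
--     return [tuple(g.split("=")) for g in groups(serialized.split(" "))]
-- ===== Notes on version B (the rewrite author's own statement) =====
-- stated objective: alternative
-- what changed: A builds groups left-to-right with an accumulator list whose last element is mutated to absorb value tokens; B instead decomposes the token list recursively, taking each group as the leading token plus its run of '='-free tokens and recursing on the remainder.
import Mathlib
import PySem

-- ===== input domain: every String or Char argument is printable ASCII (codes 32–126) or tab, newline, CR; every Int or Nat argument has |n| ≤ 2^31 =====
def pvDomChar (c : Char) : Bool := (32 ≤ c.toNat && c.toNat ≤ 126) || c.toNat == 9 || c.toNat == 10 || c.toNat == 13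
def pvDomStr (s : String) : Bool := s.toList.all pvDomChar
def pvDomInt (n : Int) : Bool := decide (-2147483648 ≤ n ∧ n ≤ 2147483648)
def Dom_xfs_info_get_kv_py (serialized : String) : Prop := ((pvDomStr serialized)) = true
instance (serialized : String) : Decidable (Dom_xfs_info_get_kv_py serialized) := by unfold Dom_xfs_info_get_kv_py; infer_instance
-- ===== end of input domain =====

-- B replaces A's accumulator loop (which mutates the last group to absorb value
-- tokens) by a recursive decomposition taking each group as the leading token
-- plus its run of '='-free tokens (objective: alternative, same cost).

-- ===== PORT A =====
-- loop body of A: append the token, or extend the last group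
-- ("opt[len(opt)-1] = opt[len(opt)-1] + ' ' + tkn" = replace the last element)
def pvStepA (opt : List String) (tkn : String) : List String :=
  if opt.isEmpty || PySem.Str.isIn "=" tkn then opt ++ [tkn]
  else
    match opt.getLast? with
    | some last => opt.dropLast ++ [last ++ " " ++ tkn]
    | none => opt

def xfs_info_get_kv_py (serialized : String) : List (List String) :=
  let s0 := if PySem.Str.startswith serialized "=" then
      PySem.Str.strip (PySem.Str.slice serialized (some 1) none) else serialized
  let s1 := PySem.Str.replace (PySem.Str.replace s0 " = " "=*** ") " =" "="
  -- s.split(" "): sep is nonempty, so split? is always `some`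
  let opt := ((PySem.Str.split? s1 " ").getD []).foldl pvStepA []
  opt.map (fun items => (PySem.Str.split? items "=").getD [])

-- ===== PORT B =====
-- "groups(tokens)": leading token plus the run of '='-free tokens, then recurse
-- (the while loop over i computes exactly the takeWhile/dropWhile split)
def pvGroups : List String → List String
  | [] => []
  | t :: ts =>
    PySem.Str.join " " (t :: ts.takeWhile (fun x => !(PySem.Str.isIn "=" x)))
      :: pvGroups (ts.dropWhile (fun x => !(PySem.Str.isIn "=" x)))
termination_by ts => ts.length
decreasing_by
  exact Nat.lt_succ_of_le (List.length_dropWhile_le _ _)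

def xfs_info_get_kv_py_alt (serialized : String) : List (List String) :=
  let s0 := if PySem.Str.startswith serialized "=" then
      PySem.Str.strip (PySem.Str.slice serialized (some 1) none) else serialized
  let s1 := PySem.Str.replace (PySem.Str.replace s0 " = " "=*** ") " =" "="
  (pvGroups ((PySem.Str.split? s1 " ").getD [])).map
    (fun g => (PySem.Str.split? g "=").getD [])

-- ===== PRECONDITION & SPEC =====
def Spec_xfs_info_get_kv_py (serialized : String) (out : List (List String)) : Prop := out = xfs_info_get_kv_py_alt serialized
instance (serialized : String) (out : List (List String)) : Decidable (Spec_xfs_info_get_kv_py serialized out) := by unfold Spec_xfs_info_get_kv_py; infer_instance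

-- ===== CLAIM (what is proved, stated in full; the proofs are below) =====
def Claim_equal_xfs_info_get_kv_py : Prop := ∀ (serialized : String), Dom_xfs_info_get_kv_py serialized → Spec_xfs_info_get_kv_py serialized (xfs_info_get_kv_py serialized)

-- ===== LEMMAS AND PROOFS =====

lemma pvGroups_nil : pvGroups [] = [] := by rw [pvGroups]

lemma pvGroups_cons (t : String) (ts : List String) :
    pvGroups (t :: ts)
      = PySem.Str.join " " (t :: ts.takeWhile (fun x => !(PySem.Str.isIn "=" x)))
        :: pvGroups (ts.dropWhile (fun x => !(PySem.Str.isIn "=" x))) := by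
  rw [pvGroups]

/-- The grouping A's loop computes, written as a forward recursion carrying
the group under construction. -/
def pvG (cur : String) : List String → List String
  | [] => [cur]
  | t :: ts => if PySem.Str.isIn "=" t then cur :: pvG t ts else pvG (cur ++ " " ++ t) ts

lemma pvJoin_singleton (x : String) : PySem.Str.join " " [x] = x := by
  apply String.toList_inj.mp
  simp [PySem.Str.toList_join, PySem.Chars.join_singleton]

lemma pvJoin_cons (x y : String) (l : List String) :
    PySem.Str.join " " (x :: y :: l) = x ++ " " ++ PySem.Str.join " " (y :: l) := by
  apply String.toList_inj.mp
  simp [PySem.Str.toList_join, PySem.Chars.join_cons_cons]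

lemma pvLoopA (ts : List String) : ∀ (pre : List String) (cur : String),
    ts.foldl pvStepA (pre ++ [cur]) = pre ++ pvG cur ts := by
  induction ts with
  | nil => intro pre cur; simp [pvG]
  | cons t ts ih =>
    intro pre cur
    rw [List.foldl_cons]
    by_cases h : PySem.Chars.isIn ['='] t.toList = true
    · rw [show pvStepA (pre ++ [cur]) t = (pre ++ [cur]) ++ [t] by simp [pvStepA, h]]
      rw [ih (pre ++ [cur]) t]
      simp [pvG, h]
    · rw [show pvStepA (pre ++ [cur]) t = pre ++ [cur ++ " " ++ t] by
        simp [pvStepA, h]]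
      rw [ih pre (cur ++ " " ++ t)]
      simp [pvG, h]

lemma pvG_eq_group (ts : List String) : ∀ (cur : String),
    pvG cur ts
      = PySem.Str.join " " (cur :: ts.takeWhile (fun x => !(PySem.Str.isIn "=" x)))
        :: pvGroups (ts.dropWhile (fun x => !(PySem.Str.isIn "=" x))) := by
  induction ts with
  | nil => intro cur; simp [pvG, pvGroups_nil, pvJoin_singleton]
  | cons t ts ih =>
    intro cur
    by_cases h : PySem.Chars.isIn ['='] t.toList = true
    · rw [show pvG cur (t :: ts) = cur :: pvG t ts by simp [pvG, h]]
      rw [ih t]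
      simp [pvGroups_cons, h, pvJoin_singleton]
    · rw [show pvG cur (t :: ts) = pvG (cur ++ " " ++ t) ts by simp [pvG, h]]
      rw [ih (cur ++ " " ++ t)]
      have hjoin : ∀ l : List String,
          PySem.Str.join " " ((cur ++ " " ++ t) :: l)
            = PySem.Str.join " " (cur :: t :: l) := by
        intro l
        cases l with
        | nil => rw [pvJoin_singleton, pvJoin_cons, pvJoin_singleton]
        | cons z l =>
          rw [pvJoin_cons, pvJoin_cons cur, pvJoin_cons t]
          apply String.toList_inj.mp
          simp
      rw [hjoin]
      simp [h]

lemma pvLoops_agree (ts : List String) :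
    ts.foldl pvStepA [] = pvGroups ts := by
  cases ts with
  | nil => simp [pvGroups_nil]
  | cons t0 ts =>
    rw [List.foldl_cons, show pvStepA [] t0 = [] ++ [t0] by simp [pvStepA],
      pvLoopA, List.nil_append, pvG_eq_group, pvGroups_cons]

-- ===== VERDICT (by name: the statement is the Claim_ definition above) =====
theorem xfs_info_get_kv_py_spec : Claim_equal_xfs_info_get_kv_py := by
  intro serialized _
  unfold Spec_xfs_info_get_kv_py xfs_info_get_kv_py xfs_info_get_kv_py_alt
  simp only
  rw [pvLoops_agree]
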